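-- pv_equiv track=rewrite | github.com/liskos/kudryshov | ege 5/240.py | alg
-- ===== SOURCE A (Python) =====
-- def f(n):
--     s = bin(n)[2:]
--     s = "0" * (4 - len(s)) + s
--     return s
--
-- def alg(n):
--     s = ""
--     while n > 0:
--         s = f(n % 10) + s
--         n = n // 10
--     s1 = ""
--     for i in s:
--         if i == "0":
--             s1 += "1"
--         else:
--             s1 += "0"
--     return int(s1,2)
-- ===== SOURCE B (Python) =====
-- def alg(n):
--     digits = []
--     while n > 0:
--         digits.append(n % 10)
--         n //= 10
--     r = 0
--     for d in reversed(digits):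
--         r = r * 16 + (15 - d)
--     return r
-- ===== Notes on version B (the rewrite author's own statement) =====
-- stated objective: simpler
-- what changed: Replaces per-digit binary string construction, character-wise bit inversion and int(s,2) reparsing with a pure arithmetic fold over the decimal digits using the identity that inverting a digit's 4-bit nibble equals 15 - digit (result = result*16 + (15 - d)).
import Mathlib
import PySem

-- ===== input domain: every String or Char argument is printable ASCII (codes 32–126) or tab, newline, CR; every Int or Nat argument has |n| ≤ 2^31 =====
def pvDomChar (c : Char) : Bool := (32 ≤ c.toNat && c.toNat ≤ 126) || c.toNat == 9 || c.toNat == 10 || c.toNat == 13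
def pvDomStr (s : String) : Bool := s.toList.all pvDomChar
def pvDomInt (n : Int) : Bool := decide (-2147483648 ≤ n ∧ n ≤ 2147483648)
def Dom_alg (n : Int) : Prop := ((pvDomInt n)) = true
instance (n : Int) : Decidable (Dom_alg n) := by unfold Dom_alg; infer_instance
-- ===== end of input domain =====

-- B replaces A's binary-string building, bit inversion and reparsing by an arithmetic
-- fold over the decimal digits (nibble inversion = 15 - digit); objective: simpler.

-- ===== PORT A =====
-- bin(m) for a nonnegative m, without the '0b' prefix (f is only applied to n % 10 ≥ 0)
def pyBinNat (m : Nat) : List Char :=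
  if h : m = 0 then [] else pyBinNat (m / 2) ++ [if m % 2 = 1 then '1' else '0']
  termination_by m
  decreasing_by exact Nat.div_lt_self (Nat.pos_of_ne_zero h) (by omega)

-- port of f: s = bin(n)[2:]; return "0" * (4 - len(s)) + s
def fA (n : Int) : List Char :=
  let s := if n = 0 then ['0'] else pyBinNat n.toNat
  List.replicate (4 - s.length) '0' ++ s

-- the while loop of alg, accumulating the string s
def algLoopA (n : Int) (s : List Char) : List Char :=
  if h : n > 0 then algLoopA (PySem.Int.floordiv n 10) (fA (PySem.Int.mod n 10) ++ s) else s
  termination_by n.toNat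
  decreasing_by
    rw [PySem.Int.floordiv_eq_ediv_of_pos (by omega : (0:Int) < 10)]; omega

def alg (n : Int) : Int :=
  let s := algLoopA n []
  -- the for loop building s1 character by character
  let s1 := s.foldl (fun acc i => acc ++ [if i = '0' then '1' else '0']) ([] : List Char)
  -- int(s1, 2); on the empty string Python raises ValueError (excluded by Pre_alg)
  s1.foldl (fun a c => 2 * a + (if c = '1' then 1 else 0)) 0

-- ===== PORT B =====
-- collect the decimal digits of n, least significant first
def digitsLoopB (n : Int) (ds : List Int) : List Int :=
  if h : n > 0 then digitsLoopB (PySem.Int.floordiv n 10) (ds ++ [PySem.Int.mod n 10]) else ds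
  termination_by n.toNat
  decreasing_by
    rw [PySem.Int.floordiv_eq_ediv_of_pos (by omega : (0:Int) < 10)]; omega

def alg_alt (n : Int) : Int :=
  ((digitsLoopB n []).reverse).foldl (fun r d => r * 16 + (15 - d)) 0

-- ===== PRECONDITION & SPEC =====
-- For n ≤ 0 the Python A reaches int('', 2) and raises ValueError, so those inputs are excluded.
def Pre_alg (n : Int) : Prop := 0 < n
instance (n : Int) : Decidable (Pre_alg n) := by unfold Pre_alg; infer_instance
def pvWitness_alg : Int := (5)

def Spec_alg (n : Int) (out : Int) : Prop := out = alg_alt n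
instance (n : Int) (out : Int) : Decidable (Spec_alg n out) := by unfold Spec_alg; infer_instance

-- ===== CLAIM (what is proved, stated in full; the proofs are below) =====
def Claim_equal_alg : Prop := ∀ (n : Int), Dom_alg n → Pre_alg n → Spec_alg n (alg n)
-- ===== LEMMAS AND PROOFS =====


-- unfolding lemmas for the two loops
theorem algLoopA_stop (n : Int) (s : List Char) (h : ¬ n > 0) : algLoopA n s = s := by
  rw [algLoopA]; simp [h]

theorem algLoopA_step (n : Int) (s : List Char) (h : n > 0) :
    algLoopA n s = algLoopA (PySem.Int.floordiv n 10) (fA (PySem.Int.mod n 10) ++ s) := by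
  conv_lhs => rw [algLoopA]
  simp [h]

theorem digitsLoopB_stop (n : Int) (ds : List Int) (h : ¬ n > 0) : digitsLoopB n ds = ds := by
  rw [digitsLoopB]; simp [h]

theorem digitsLoopB_step (n : Int) (ds : List Int) (h : n > 0) :
    digitsLoopB n ds = digitsLoopB (PySem.Int.floordiv n 10) (ds ++ [PySem.Int.mod n 10]) := by
  conv_lhs => rw [digitsLoopB]
  simp [h]

-- accumulator invariants of the two loops
theorem algLoopA_acc (m : Nat) : ∀ (n : Int), n.toNat ≤ m → ∀ (s : List Char),
    algLoopA n s = algLoopA n [] ++ s := by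
  induction m with
  | zero =>
    intro n hn s
    have h : ¬ n > 0 := by omega
    rw [algLoopA_stop n s h, algLoopA_stop n [] h]; simp
  | succ m ih =>
    intro n hn s
    by_cases h : n > 0
    · have hlt : (PySem.Int.floordiv n 10).toNat ≤ m := by
        rw [PySem.Int.floordiv_eq_ediv_of_pos (by omega : (0:Int) < 10)]; omega
      rw [algLoopA_step n s h, algLoopA_step n [] h]
      rw [ih _ hlt, ih _ hlt (fA (PySem.Int.mod n 10) ++ [])]
      simp
    · rw [algLoopA_stop n s h, algLoopA_stop n [] h]; simp
 
theorem digitsLoopB_acc (m : Nat) : ∀ (n : Int), n.toNat ≤ m → ∀ (ds : List Int),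
    digitsLoopB n ds = ds ++ digitsLoopB n [] := by
  induction m with
  | zero =>
    intro n hn ds
    have h : ¬ n > 0 := by omega
    rw [digitsLoopB_stop n ds h, digitsLoopB_stop n [] h]; simp
  | succ m ih =>
    intro n hn ds
    by_cases h : n > 0
    · have hlt : (PySem.Int.floordiv n 10).toNat ≤ m := by
        rw [PySem.Int.floordiv_eq_ediv_of_pos (by omega : (0:Int) < 10)]; omega
      rw [digitsLoopB_step n ds h, digitsLoopB_step n [] h]
      rw [ih _ hlt, ih _ hlt ([] ++ [PySem.Int.mod n 10])]
      simp
    · rw [digitsLoopB_stop n ds h, digitsLoopB_stop n [] h]; simp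

-- A's character-inversion loop is a map
theorem foldl_inv (s : List Char) : ∀ (acc : List Char),
    s.foldl (fun acc i => acc ++ [if i = '0' then '1' else '0']) acc
      = acc ++ s.map (fun i => if i = '0' then '1' else '0') := by
  induction s with
  | nil => intro acc; simp
  | cons c t ih => intro acc; simp [List.foldl_cons, ih]

-- binary parsing: starting accumulator scales by 2^length
theorem parse_shift (s : List Char) : ∀ (a : Int),
    s.foldl (fun a c => 2 * a + (if c = '1' then 1 else 0)) a
      = a * 2 ^ s.length + s.foldl (fun a c => 2 * a + (if c = '1' then 1 else 0)) 0 := by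
  induction s with
  | nil => intro a; simp
  | cons c t ih =>
    intro a
    simp only [List.foldl_cons, List.length_cons]
    rw [ih (2 * a + (if c = '1' then 1 else 0)), ih (2 * 0 + (if c = '1' then 1 else 0))]
    ring

-- the binary strings of the ten decimal digits
theorem pb1 : pyBinNat 1 = ['1'] := by
  rw [pyBinNat]; norm_num; rw [pyBinNat]; norm_num
theorem pb2 : pyBinNat 2 = ['1', '0'] := by
  rw [pyBinNat]; norm_num; rw [pb1]; rfl
theorem pb3 : pyBinNat 3 = ['1', '1'] := by
  rw [pyBinNat]; norm_num; rw [pb1]; rfl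
theorem pb4 : pyBinNat 4 = ['1', '0', '0'] := by
  rw [pyBinNat]; norm_num; rw [pb2]; rfl
theorem pb5 : pyBinNat 5 = ['1', '0', '1'] := by
  rw [pyBinNat]; norm_num; rw [pb2]; rfl
theorem pb6 : pyBinNat 6 = ['1', '1', '0'] := by
  rw [pyBinNat]; norm_num; rw [pb3]; rfl
theorem pb7 : pyBinNat 7 = ['1', '1', '1'] := by
  rw [pyBinNat]; norm_num; rw [pb3]; rfl
theorem pb8 : pyBinNat 8 = ['1', '0', '0', '0'] := by
  rw [pyBinNat]; norm_num; rw [pb4]; rfl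
theorem pb9 : pyBinNat 9 = ['1', '0', '0', '1'] := by
  rw [pyBinNat]; norm_num; rw [pb4]; rfl

-- inverting a digit's 4-bit nibble equals 15 - digit
theorem nibble_lemma (d : Int) (h0 : 0 ≤ d) (h1 : d < 10) :
    ((fA d).map (fun i => if i = '0' then '1' else '0')).length = 4 ∧
    ((fA d).map (fun i => if i = '0' then '1' else '0')).foldl
        (fun a c => 2 * a + (if c = '1' then 1 else 0)) (0 : Int) = 15 - d := by
  interval_cases d <;>
    norm_num [fA, show ((2:Int)).toNat = 2 from rfl, show ((3:Int)).toNat = 3 from rfl, show ((4:Int)).toNat = 4 from rfl, show ((5:Int)).toNat = 5 from rfl, show ((6:Int)).toNat = 6 from rfl, show ((7:Int)).toNat = 7 from rfl, show ((8:Int)).toNat = 8 from rfl, show ((9:Int)).toNat = 9 from rfl, pb1, pb2, pb3, pb4, pb5, pb6, pb7, pb8, pb9,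
      List.replicate] <;> decide

theorem key (m : Nat) : ∀ (n : Int), n.toNat ≤ m →
    ((algLoopA n []).foldl (fun acc i => acc ++ [if i = '0' then '1' else '0']) ([] : List Char)).foldl
        (fun a c => 2 * a + (if c = '1' then 1 else 0)) (0 : Int)
      = ((digitsLoopB n []).reverse).foldl (fun r d => r * 16 + (15 - d)) (0 : Int) := by
  induction m with
  | zero =>
    intro n hn
    have h : ¬ n > 0 := by omega
    rw [algLoopA_stop n [] h, digitsLoopB_stop n [] h]
    simp
  | succ m ih =>
    intro n hn
    by_cases h : n > 0
    · have hlt : (PySem.Int.floordiv n 10).toNat ≤ m := by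
        rw [PySem.Int.floordiv_eq_ediv_of_pos (by omega : (0:Int) < 10)]; omega
      have hd0 : 0 ≤ PySem.Int.mod n 10 := PySem.Int.mod_nonneg n (by omega)
      have hd1 : PySem.Int.mod n 10 < 10 := PySem.Int.mod_lt n (by omega)
      obtain ⟨hlen, hval⟩ := nibble_lemma (PySem.Int.mod n 10) hd0 hd1
      rw [algLoopA_step n [] h, digitsLoopB_step n [] h]
      rw [algLoopA_acc m _ hlt, digitsLoopB_acc m _ hlt]
      rw [foldl_inv]
      simp only [List.nil_append, List.append_nil, List.map_append, List.reverse_append,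
        List.reverse_cons, List.reverse_nil, List.nil_append, List.foldl_append, List.foldl_cons,
        List.foldl_nil]
      rw [parse_shift ((fA (PySem.Int.mod n 10)).map (fun i => if i = '0' then '1' else '0'))]
      rw [hlen, hval]
      have ihm := ih _ hlt
      rw [foldl_inv, List.nil_append] at ihm
      rw [ihm]
      ring
    · rw [algLoopA_stop n [] h, digitsLoopB_stop n [] h]
      simp

-- ===== VERDICT (by name: the statement is the Claim_ definition above) =====
theorem alg_spec : Claim_equal_alg := by
  intro n _ _
  unfold Spec_alg alg alg_alt
  exact key n.toNat n le_rfl
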